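-- pv_equiv track=rewrite | github.com/eduardorossetti/python | matriz-primos/main.py | retornaVetor
-- ===== SOURCE A (Python) =====
-- def retornaVetor(lin, col, mat):
--     pares = []
--     impares = []
--     for l in range(lin):
--         for c in range(col):
--             if mat[l][c] % 2 == 0:
--                 pares.append(mat[l][c])
--             else:
--                 impares.append(mat[l][c])
--     vetor = sorted(pares) + sorted(impares)
--     return vetor
-- ===== SOURCE B (Python) =====
-- def retornaVetor(lin, col, mat):
--     todos = sorted(mat[l][c] for l in range(lin) for c in range(col))
--     pares = []
--     impares = []
--     for x in todos:
--         if x % 2 == 0: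
--             pares.append(x)
--         else:
--             impares.append(x)
--     return pares + impares
-- ===== Notes on version B (the rewrite author's own statement) =====
-- stated objective: alternative
-- what changed: B flattens the lin x col window into one list, sorts it ONCE globally, and splits the sorted list into evens-then-odds in a single pass, instead of A's cell-by-cell appends into two lists that are each sorted separately.
import Mathlib
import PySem

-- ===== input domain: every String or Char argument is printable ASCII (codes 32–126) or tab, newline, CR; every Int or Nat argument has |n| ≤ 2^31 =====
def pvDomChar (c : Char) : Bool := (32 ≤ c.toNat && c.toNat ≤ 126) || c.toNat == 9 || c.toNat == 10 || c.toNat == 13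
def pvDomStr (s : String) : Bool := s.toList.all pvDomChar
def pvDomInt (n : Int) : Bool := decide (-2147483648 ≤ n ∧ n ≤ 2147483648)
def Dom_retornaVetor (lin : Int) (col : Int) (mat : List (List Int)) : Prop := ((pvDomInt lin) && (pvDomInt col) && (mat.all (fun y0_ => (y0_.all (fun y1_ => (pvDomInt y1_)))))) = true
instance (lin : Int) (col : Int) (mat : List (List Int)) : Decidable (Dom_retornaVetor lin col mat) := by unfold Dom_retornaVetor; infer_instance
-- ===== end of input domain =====

-- B flattens the lin×col window into one list, sorts it once globally, and splits the sorted
-- list into evens-then-odds in one pass, instead of A's two per-parity lists sorted separately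
-- (objective: alternative; same asymptotic cost).

-- ===== PORT A =====
def retornaVetor (lin : Int) (col : Int) (mat : List (List Int)) : List Int :=
  -- pares/impares built by the nested index loops; mat[l][c] is pyGetD (in range on Pre_)
  let st := (PySem.List.pyRange 0 lin 1).foldl (fun (st : List Int × List Int) l =>
      (PySem.List.pyRange 0 col 1).foldl (fun st c =>
        let v := PySem.List.pyGetD (PySem.List.pyGetD mat l []) c 0
        if PySem.Int.mod v 2 = 0 then (st.1 ++ [v], st.2) else (st.1, st.2 ++ [v])) st)
    ([], [])
  PySem.List.sorted st.1 (fun x => x) false ++ PySem.List.sorted st.2 (fun x => x) false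

-- ===== PORT B =====
def retornaVetor_alt (lin : Int) (col : Int) (mat : List (List Int)) : List Int :=
  -- todos = sorted(mat[l][c] for l in range(lin) for c in range(col))
  let todos := PySem.List.sorted
    ((PySem.List.pyRange 0 lin 1).flatMap (fun l =>
      (PySem.List.pyRange 0 col 1).map (fun c =>
        PySem.List.pyGetD (PySem.List.pyGetD mat l []) c 0)))
    (fun x => x) false
  let st := todos.foldl (fun (st : List Int × List Int) x =>
      if PySem.Int.mod x 2 = 0 then (st.1 ++ [x], st.2) else (st.1, st.2 ++ [x])) ([], [])
  st.1 ++ st.2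

-- ===== PRECONDITION & SPEC =====
-- Pre_ excludes exactly the inputs on which A raises IndexError: a positive window
-- (0 < lin and 0 < col) reaching past the matrix's rows or past a visited row's length.
def Pre_retornaVetor (lin : Int) (col : Int) (mat : List (List Int)) : Prop :=
  lin ≤ 0 ∨ col ≤ 0 ∨
    (0 ≤ lin ∧ lin ≤ (mat.length : Int) ∧ 0 ≤ col ∧
      ∀ row ∈ mat.take lin.toNat, col ≤ (row.length : Int))
instance (lin : Int) (col : Int) (mat : List (List Int)) : Decidable (Pre_retornaVetor lin col mat) := by unfold Pre_retornaVetor; infer_instance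

def pvWitness_retornaVetor : Int × Int × List (List Int) := (2, 2, [[1, 2], [3, 4]])

def Spec_retornaVetor (lin : Int) (col : Int) (mat : List (List Int)) (out : List Int) : Prop := out = retornaVetor_alt lin col mat
instance (lin : Int) (col : Int) (mat : List (List Int)) (out : List Int) : Decidable (Spec_retornaVetor lin col mat out) := by unfold Spec_retornaVetor; infer_instance

-- ===== CLAIM (what is proved, stated in full; the proofs are below) =====
def Claim_equal_retornaVetor : Prop := ∀ (lin : Int) (col : Int) (mat : List (List Int)), Dom_retornaVetor lin col mat → Pre_retornaVetor lin col mat → Spec_retornaVetor lin col mat (retornaVetor lin col mat)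

-- ===== LEMMAS AND PROOFS =====

-- the parity step of both loops
def pvStep (st : List Int × List Int) (v : Int) : List Int × List Int :=
  if PySem.Int.mod v 2 = 0 then (st.1 ++ [v], st.2) else (st.1, st.2 ++ [v])

-- a partition loop appends the matching filter to each accumulator
theorem pvPartition {p : Int → Prop} [DecidablePred p] (xs : List Int) (a b : List Int) :
    xs.foldl (fun st v => if p v then (st.1 ++ [v], st.2) else (st.1, st.2 ++ [v])) (a, b)
      = (a ++ xs.filter (fun v => decide (p v)), b ++ xs.filter (fun v => !decide (p v))) := by
  induction xs generalizing a b with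
  | nil => simp
  | cons x xs ih =>
    rw [List.foldl_cons, List.filter_cons, List.filter_cons]
    by_cases h : p x
    · simp only [if_pos h, h, decide_true, Bool.not_true, Bool.false_eq_true, if_false, if_true]
      rw [ih]
      simp
    · simp only [h, decide_false, Bool.not_false, Bool.false_eq_true, if_false, if_true]
      rw [ih]
      simp

-- pvStep is the partition lambda
theorem pvStep_eq :
    pvStep = (fun (st : List Int × List Int) v =>
      if PySem.Int.mod v 2 = 0 then (st.1 ++ [v], st.2) else (st.1, st.2 ++ [v])) := rfl

-- a foldl over range(n) indexing with a default is a foldl over the prefix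
theorem pvFoldlRangeGetD {α β : Type} (f : β → α → β) (xs : List α) (d : α) :
    ∀ (n : Nat), n ≤ xs.length → ∀ (init : β),
    (List.range n).foldl (fun b k => f b (xs.getD k d)) init = (xs.take n).foldl f init := by
  intro n
  induction n with
  | zero => simp
  | succ m ih =>
    intro h init
    have hm : m < xs.length := by omega
    have ht : xs.take (m + 1) = xs.take m ++ [xs[m]] := by
      rw [List.take_succ]
      simp [List.getElem?_eq_getElem hm]
    rw [List.range_succ, List.foldl_append, ih (by omega), ht, List.foldl_append]
    simp [List.getElem?_eq_getElem hm]

-- a foldl over pyRange(0, n) indexing with pyGetD is a foldl over the prefix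
theorem pvFoldlPyRange {α β : Type} (f : β → α → β) (xs : List α) (d : α) (n : Int)
    (h0 : 0 ≤ n) (h : n ≤ (xs.length : Int)) (init : β) :
    (PySem.List.pyRange 0 n 1).foldl (fun b i => f b (PySem.List.pyGetD xs i d)) init
      = (xs.take n.toNat).foldl f init := by
  rw [PySem.List.pyRange_one, List.foldl_map]
  simp only [sub_zero, zero_add, PySem.List.pyGetD_natCast]
  exact pvFoldlRangeGetD f xs d n.toNat (by omega) init

-- a map over range(n) indexing with a default is the prefix itself
theorem pvMapRangeGetD {α : Type} (xs : List α) (d : α) :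
    ∀ (n : Nat), n ≤ xs.length → (List.range n).map (fun k => xs.getD k d) = xs.take n := by
  intro n
  induction n with
  | zero => simp
  | succ m ih =>
    intro h
    have hm : m < xs.length := by omega
    have ht : xs.take (m + 1) = xs.take m ++ [xs[m]] := by
      rw [List.take_succ]
      simp [List.getElem?_eq_getElem hm]
    rw [List.range_succ, List.map_append, ih (by omega), ht]
    simp [List.getElem?_eq_getElem hm]

-- a map over pyRange(0, n) indexing with pyGetD is the prefix itself
theorem pvMapPyRange {α : Type} (xs : List α) (d : α) (n : Int)
    (h0 : 0 ≤ n) (h : n ≤ (xs.length : Int)) :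
    (PySem.List.pyRange 0 n 1).map (fun i => PySem.List.pyGetD xs i d) = xs.take n.toNat := by
  rw [PySem.List.pyRange_one, List.map_map]
  simp only [sub_zero, zero_add, Function.comp_def, PySem.List.pyGetD_natCast]
  exact pvMapRangeGetD xs d n.toNat (by omega)

-- the identity fold
theorem pvFoldlId {α β : Type} (l : List α) (st : β) : l.foldl (fun s _ => s) st = st := by
  induction l generalizing st with
  | nil => rfl
  | cons x l ih => simpa using ih st

-- sorting commutes with filtering
theorem pvSortedFilter (p : Int → Bool) (xs : List Int) :
    PySem.List.sorted (xs.filter p) (fun x => x) false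
      = (PySem.List.sorted xs (fun x => x) false).filter p := by
  apply PySem.List.sorted_id_eq_of_perm_of_pairwise
  · exact (PySem.List.sorted_perm xs (fun x => x) false).filter p
  · exact (PySem.List.sorted_pairwise xs (fun x => x)).filter p

-- ===== VERDICT (by name: the statement is the Claim_ definition above) =====
-- sorted [] is []
theorem pvSortedNil : PySem.List.sorted ([] : List Int) (fun x => x) false = [] := by
  rw [PySem.List.sorted_eq_nil_iff]

-- ===== VERDICT (by name: the statement is the Claim_ definition above) =====
theorem retornaVetor_spec : Claim_equal_retornaVetor := by
  intro lin col mat _ hpre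
  unfold Spec_retornaVetor retornaVetor retornaVetor_alt
  rcases hpre with hl | hc | ⟨hl0, hll, hc0, hrow⟩
  · -- lin ≤ 0: both loops are empty
    rw [PySem.List.pyRange_one_eq_nil hl]
    simp [pvSortedNil]
  · -- col ≤ 0: the inner loop is empty; A's outer loop is the identity fold
    rw [PySem.List.pyRange_one_eq_nil hc]
    simp only [List.foldl_nil, List.map_nil]
    rw [pvFoldlId]
    have hfm : (PySem.List.pyRange 0 lin 1).flatMap (fun l => ([] : List Int)) = [] := by
      simp
    rw [hfm]
    simp [pvSortedNil]
  · -- the main case: a positive window inside the matrix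
    set F := ((mat.take lin.toNat).map (fun row => row.take col.toNat)).flatten with hF
    -- the inner loop of A, zeta-reduced to pvStep form
    have hport : (fun (st : List Int × List Int) (l : Int) =>
        (PySem.List.pyRange 0 col 1).foldl (fun st c =>
          let v := PySem.List.pyGetD (PySem.List.pyGetD mat l []) c 0
          if PySem.Int.mod v 2 = 0 then (st.1 ++ [v], st.2) else (st.1, st.2 ++ [v])) st)
      = (fun (st : List Int × List Int) (l : Int) =>
        (PySem.List.pyRange 0 col 1).foldl
          (fun st c => pvStep st (PySem.List.pyGetD (PySem.List.pyGetD mat l []) c 0)) st) := rfl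
    rw [hport]
    -- A side: the nested loops are a fold of pvStep over F
    have hA : (PySem.List.pyRange 0 lin 1).foldl (fun (st : List Int × List Int) l =>
        (PySem.List.pyRange 0 col 1).foldl
          (fun st c => pvStep st (PySem.List.pyGetD (PySem.List.pyGetD mat l []) c 0)) st)
        ([], []) = F.foldl pvStep ([], []) := by
      rw [pvFoldlPyRange (fun (st : List Int × List Int) row =>
          (PySem.List.pyRange 0 col 1).foldl (fun st c =>
            pvStep st (PySem.List.pyGetD row c 0)) st) mat [] lin hl0 hll]
      rw [hF, List.foldl_flatten, List.foldl_map]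
      apply List.foldl_ext
      intro st row hr
      exact pvFoldlPyRange pvStep row 0 col hc0 (hrow row hr) st
    rw [hA]
    -- B side: the comprehension flattens exactly F
    have hB : (PySem.List.pyRange 0 lin 1).flatMap (fun l =>
        (PySem.List.pyRange 0 col 1).map (fun c =>
          PySem.List.pyGetD (PySem.List.pyGetD mat l []) c 0)) = F := by
      have h1 : (PySem.List.pyRange 0 lin 1).map (fun l =>
          (PySem.List.pyRange 0 col 1).map (fun c =>
            PySem.List.pyGetD (PySem.List.pyGetD mat l []) c 0))
        = ((PySem.List.pyRange 0 lin 1).map (fun l => PySem.List.pyGetD mat l [])).map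
            (fun row => (PySem.List.pyRange 0 col 1).map (fun c => PySem.List.pyGetD row c 0)) := by
        rw [List.map_map]
        rfl
      rw [List.flatMap_def, h1, pvMapPyRange mat [] lin hl0 hll, hF]
      congr 1
      apply List.map_congr_left
      intro row hr
      exact pvMapPyRange row 0 col hc0 (hrow row hr)
    rw [hB]
    -- both loops are the parity partition; sorting commutes with the parity filters
    rw [pvStep_eq, pvPartition (p := fun v => PySem.Int.mod v 2 = 0)]
    simp only [List.nil_append]
    rw [pvSortedFilter, pvSortedFilter,
        pvPartition (p := fun v => PySem.Int.mod v 2 = 0) (PySem.List.sorted F (fun x => x) false) [] []]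
    simp
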